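-- pv_equiv track=rewrite | github.com/Se7enB2st/Threat-Intelligence-Platform | data_manager.py | _calculate_port_risk
-- ===== SOURCE A (Python) =====
-- from typing import Dict, Optional, List
--
-- def _calculate_port_risk(ports: List[int]) -> float:
--     """Calculate risk score based on open ports"""
--     high_risk_ports = {21, 23, 3389, 445, 135, 137, 138, 139}
--     medium_risk_ports = {80, 443, 8080, 8443, 22}
--
--     risk_score = 0
--     for port in ports:
--         if port in high_risk_ports:
--             risk_score += 10
--         elif port in medium_risk_ports:
--             risk_score += 5
--         else:
--             risk_score += 1
--
--     return min(100, risk_score)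
-- ===== SOURCE B (Python) =====
-- def _calculate_port_risk(ports):
--     """Calculate risk score based on open ports (count categories, closed form)."""
--     high_risk_ports = {21, 23, 3389, 445, 135, 137, 138, 139}
--     medium_risk_ports = {80, 443, 8080, 8443, 22}
--     count_high = sum(1 for p in ports if p in high_risk_ports)
--     count_medium = sum(1 for p in ports if p in medium_risk_ports)
--     return min(100, len(ports) + 9 * count_high + 4 * count_medium)
-- ===== Notes on version B (the rewrite author's own statement) =====
-- stated objective: alternative
-- what changed: B counts the high-risk and medium-risk ports in two category passes and combines them with the closed form len(ports) + 9*count_high + 4*count_medium (every port contributes a baseline 1), instead of accumulating per-port through an if/elif/else chain.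
import Mathlib
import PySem

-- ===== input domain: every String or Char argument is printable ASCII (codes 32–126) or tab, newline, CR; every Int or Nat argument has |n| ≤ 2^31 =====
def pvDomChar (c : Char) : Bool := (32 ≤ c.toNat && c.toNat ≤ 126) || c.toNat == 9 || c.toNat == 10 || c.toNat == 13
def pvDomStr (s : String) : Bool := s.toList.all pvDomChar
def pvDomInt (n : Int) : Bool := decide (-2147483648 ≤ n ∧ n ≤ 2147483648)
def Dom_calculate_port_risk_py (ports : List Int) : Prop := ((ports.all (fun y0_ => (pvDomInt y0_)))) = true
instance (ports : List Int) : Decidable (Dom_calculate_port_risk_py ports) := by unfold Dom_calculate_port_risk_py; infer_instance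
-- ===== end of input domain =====

-- B replaces A's per-port if/elif accumulation by two category counts combined in a closed form (alternative decomposition, same cost).


-- ===== PORT A =====
-- the two port sets (Python set literals; membership test only)
def pvHighRiskPorts : List Int := [21, 23, 3389, 445, 135, 137, 138, 139]
def pvMediumRiskPorts : List Int := [80, 443, 8080, 8443, 22]

def calculate_port_risk_py (ports : List Int) : Int :=
  let risk_score : Int := ports.foldl (fun acc port =>
    if pvHighRiskPorts.contains port then acc + 10
    else if pvMediumRiskPorts.contains port then acc + 5
    else acc + 1) 0
  min 100 risk_score

-- ===== PORT B =====
def calculate_port_risk_py_alt (ports : List Int) : Int :=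
  let count_high : Int := (ports.countP (fun p => pvHighRiskPorts.contains p) : Nat)
  let count_medium : Int := (ports.countP (fun p => pvMediumRiskPorts.contains p) : Nat)
  min 100 ((ports.length : Int) + 9 * count_high + 4 * count_medium)

-- ===== PRECONDITION & SPEC =====
def Spec_calculate_port_risk_py (ports : List Int) (out : Int) : Prop := out = calculate_port_risk_py_alt ports
instance (ports : List Int) (out : Int) : Decidable (Spec_calculate_port_risk_py ports out) := by unfold Spec_calculate_port_risk_py; infer_instance

-- ===== CLAIM (what is proved, stated in full; the proofs are below) =====
def Claim_equal_calculate_port_risk_py : Prop := ∀ (ports : List Int), Dom_calculate_port_risk_py ports → Spec_calculate_port_risk_py ports (calculate_port_risk_py ports)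

-- ===== LEMMAS AND PROOFS =====
theorem pv_disjoint (p : Int) (h : p ∈ pvHighRiskPorts) :
    p ∉ pvMediumRiskPorts := by
  simp [pvHighRiskPorts, pvMediumRiskPorts] at h ⊢
  rcases h with h|h|h|h|h|h|h|h <;> omega

theorem pv_fold_eq (ports : List Int) (acc : Int) :
    ports.foldl (fun acc port =>
      if pvHighRiskPorts.contains port then acc + 10
      else if pvMediumRiskPorts.contains port then acc + 5
      else acc + 1) acc
    = acc + (ports.length : Int)
        + 9 * (ports.countP (fun p => pvHighRiskPorts.contains p) : Nat)
        + 4 * (ports.countP (fun p => pvMediumRiskPorts.contains p) : Nat) := by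
  simp only [List.contains_eq_mem]
  induction ports generalizing acc with
  | nil => simp
  | cons p ps ih =>
    rw [List.foldl_cons, List.countP_cons, List.countP_cons]
    by_cases hh : p ∈ pvHighRiskPorts
    · have hm := pv_disjoint p hh
      simp only [hh, hm, decide_true, decide_false, if_true]
      rw [ih, List.length_cons]; push_cast; ring
    · by_cases hm : p ∈ pvMediumRiskPorts
      · simp only [hh, hm, decide_true, decide_false, if_true]
        rw [ih, List.length_cons]; push_cast; ring
      · simp only [hh, hm, decide_false]
        rw [ih, List.length_cons]; push_cast; ring

-- ===== VERDICT (by name: the statement is the Claim_ definition above) =====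
theorem calculate_port_risk_py_spec : Claim_equal_calculate_port_risk_py := by
  intro ports _
  unfold Spec_calculate_port_risk_py calculate_port_risk_py calculate_port_risk_py_alt
  rw [pv_fold_eq ports 0]
  norm_num
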